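-- pv_equiv track=rewrite | github.com/matthewthomasbeck/Robot_Dog_Athena | training/isaac_sim.py | build_isaac_joint_index_map
-- ===== SOURCE A (Python) =====
-- def build_isaac_joint_index_map(dof_names):
--
--     alias_to_actual = {}
--
--     for name in dof_names:
--         parts = name.split("_")
--         if len(parts) >= 2:
--             leg_id = parts[0]
--             if parts[1] in {"hip", "upper", "lower"}:
--                 joint_type = parts[1]
--             elif "femur" in name:
--                 joint_type = "upper"
--             elif "shin" in name:
--                 joint_type = "lower"
--             else:
--                 continue
--             alias = f"{leg_id}_{joint_type}"
--             if alias not in alias_to_actual: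
--                 alias_to_actual[alias] = name  # first valid mapping
--
--     joint_index_map = {}
--     for alias, actual_name in alias_to_actual.items():
--         if actual_name in dof_names:
--             joint_index_map[alias] = dof_names.index(actual_name)
--
--     return joint_index_map
-- ===== SOURCE B (Python) =====
-- def build_isaac_joint_index_map(dof_names):
--     joint_index_map = {}
--     for i, name in enumerate(dof_names):
--         parts = name.split("_")
--         if len(parts) < 2:
--             continue
--         leg_id = parts[0]
--         if parts[1] in {"hip", "upper", "lower"}:
--             joint_type = parts[1]
--         elif "femur" in name:
--             joint_type = "upper"
--         elif "shin" in name: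
--             joint_type = "lower"
--         else:
--             continue
--         alias = f"{leg_id}_{joint_type}"
--         if alias not in joint_index_map:
--             joint_index_map[alias] = i
--     return joint_index_map
-- ===== Notes on version B (the rewrite author's own statement) =====
-- stated objective: simpler
-- what changed: B builds the alias->index dict in one enumerate pass, storing the index at the first valid encounter, instead of A's two loops with an intermediate alias->name table and a dof_names.index rescan per alias.
import Mathlib
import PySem

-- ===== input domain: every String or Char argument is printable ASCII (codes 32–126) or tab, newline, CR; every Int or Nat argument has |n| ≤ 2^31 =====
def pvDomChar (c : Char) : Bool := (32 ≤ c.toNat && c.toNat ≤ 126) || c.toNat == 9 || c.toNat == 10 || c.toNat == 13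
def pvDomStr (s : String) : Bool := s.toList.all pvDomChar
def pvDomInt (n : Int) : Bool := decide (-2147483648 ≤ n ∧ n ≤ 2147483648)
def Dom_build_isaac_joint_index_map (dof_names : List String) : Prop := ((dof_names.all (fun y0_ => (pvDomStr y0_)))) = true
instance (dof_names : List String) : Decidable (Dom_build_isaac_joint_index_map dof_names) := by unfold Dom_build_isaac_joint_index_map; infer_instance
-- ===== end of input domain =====

-- B fuses A's two loops into one enumerate pass (no alias->name table, no .index rescan); return values proved equal.

-- shared per-name classification (identical lines in both Pythons):
-- returns the alias f"{leg_id}_{joint_type}" or none on 'continue'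
def pvAlias? (name : String) : Option String :=
  let parts := (PySem.Str.split? name "_").getD []
  if 2 ≤ parts.length then
    let leg_id := parts.getD 0 ""
    let p1 := parts.getD 1 ""
    if p1 = "hip" ∨ p1 = "upper" ∨ p1 = "lower" then
      some (PySem.Str.join "_" [leg_id, p1])
    else if PySem.Str.isIn "femur" name then
      some (PySem.Str.join "_" [leg_id, "upper"])
    else if PySem.Str.isIn "shin" name then
      some (PySem.Str.join "_" [leg_id, "lower"])
    else none
  else none

-- ===== PORT A =====
def build_isaac_joint_index_map (dof_names : List String) : List (String × Int) :=
  let alias_to_actual : PySem.Dict String String :=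
    dof_names.foldl (fun d name =>
      match pvAlias? name with
      | none => d
      | some al => if d.contains al then d else d.insert al name)
      PySem.Dict.empty
  let joint_index_map : PySem.Dict String Int :=
    alias_to_actual.items.foldl (fun d q =>
      if dof_names.contains q.2 then
        d.insert q.1 (((PySem.List.index? dof_names q.2).getD 0 : Nat) : Int)
      else d)
      PySem.Dict.empty
  joint_index_map.items

-- ===== PORT B =====
def build_isaac_joint_index_map_alt (dof_names : List String) : List (String × Int) :=
  ((PySem.List.enumerate dof_names 0).foldl (fun d p =>
      match pvAlias? p.2 with
      | none => d
      | some al => if d.contains al then d else d.insert al p.1)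
    (PySem.Dict.empty : PySem.Dict String Int)).items

-- ===== PRECONDITION & SPEC =====
def Spec_build_isaac_joint_index_map (dof_names : List String) (out : List (String × Int)) : Prop := out = build_isaac_joint_index_map_alt dof_names
instance (dof_names : List String) (out : List (String × Int)) : Decidable (Spec_build_isaac_joint_index_map dof_names out) := by unfold Spec_build_isaac_joint_index_map; infer_instance

-- ===== CLAIM (what is proved, stated in full; the proofs are below) =====
def Claim_equal_build_isaac_joint_index_map : Prop := ∀ (dof_names : List String), Dom_build_isaac_joint_index_map dof_names → Spec_build_isaac_joint_index_map dof_names (build_isaac_joint_index_map dof_names)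

-- ===== LEMMAS AND PROOFS =====

-- the two loop bodies
def pvStepA (d : PySem.Dict String String) (name : String) : PySem.Dict String String :=
  match pvAlias? name with
  | none => d
  | some al => if d.contains al then d else d.insert al name

def pvStepB (d : PySem.Dict String Int) (p : Int × String) : PySem.Dict String Int :=
  match pvAlias? p.2 with
  | none => d
  | some al => if d.contains al then d else d.insert al p.1

-- helper: B's dict has the same keys as A's under the item relation
theorem pvContains_eq (dA : PySem.Dict String String) (dB : PySem.Dict String Int)
    (F : String × String → String × Int) (hF : ∀ q, (F q).1 = q.1)
    (h : dB.items = dA.items.map F) (a : String) : dB.contains a = dA.contains a := by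
  rw [PySem.Dict.contains_eq_decide_mem_keys, PySem.Dict.contains_eq_decide_mem_keys]
  have hk : dB.keys = dA.keys := by
    show dB.items.map (·.1) = dA.items.map (·.1)
    rw [h, List.map_map]
    exact List.map_congr_left (fun q _ => hF q)
  rw [hk]

theorem pvLoopRel (full : List String) :
    ∀ (l : List String) (k : Nat) (dA : PySem.Dict String String) (dB : PySem.Dict String Int),
      full.drop k = l →
      dB.items = dA.items.map (fun q => (q.1, (((PySem.List.index? full q.2).getD 0 : Nat) : Int))) →
      (∀ q ∈ dA.items, q.2 ∈ full) →
      (∀ j : Nat, j < k → ∀ hj : j < full.length, ∀ a, pvAlias? full[j] = some a → dA.contains a = true) →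
      dA.keys.Nodup →
      (((PySem.List.enumerate l (k : Int)).foldl pvStepB dB).items
          = (l.foldl pvStepA dA).items.map (fun q => (q.1, (((PySem.List.index? full q.2).getD 0 : Nat) : Int)))
        ∧ (∀ q ∈ (l.foldl pvStepA dA).items, q.2 ∈ full)
        ∧ (l.foldl pvStepA dA).keys.Nodup) := by
  intro l
  induction l with
  | nil =>
    intro k dA dB _ hitems hmem _ hnd
    simp only [PySem.List.enumerate_nil, List.foldl_nil]
    exact ⟨hitems, hmem, hnd⟩
  | cons x t IH =>
    intro k dA dB hdrop hitems hmem hfresh hnd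
    have hx? : full[k]? = some x := by
      have h0 : (full.drop k)[0]? = some x := by rw [hdrop]; rfl
      rw [List.getElem?_drop] at h0
      simpa using h0
    have hklt : k < full.length := (List.getElem?_eq_some_iff.mp hx?).1
    have hxk : full[k] = x := by
      obtain ⟨h1, h2⟩ := List.getElem?_eq_some_iff.mp hx?; exact h2
    have hdrop1 : full.drop (k+1) = t := by
      have : full.drop (k+1) = (full.drop k).drop 1 := by
        rw [List.drop_drop]
      rw [this, hdrop]; rfl
    rw [PySem.List.enumerate_cons]
    simp only [List.foldl_cons]
    have hcast : ((k : Int) + 1) = ((k+1 : Nat) : Int) := by push_cast; ring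
    rw [hcast]
    rcases hA : pvAlias? x with _ | a
    · have hsA : pvStepA dA x = dA := by simp [pvStepA, hA]
      have hsB : pvStepB dB ((k : Int), x) = dB := by simp [pvStepB, hA]
      rw [hsA, hsB]
      refine IH (k+1) dA dB hdrop1 hitems hmem ?_ hnd
      intro j hj hjlt a' ha'
      rcases Nat.lt_succ_iff_lt_or_eq.mp hj with hlt | heq
      · exact hfresh j hlt hjlt a' ha'
      · subst heq; rw [hxk] at ha'; rw [ha'] at hA; cases hA
    · have hcont := pvContains_eq dA dB _ (fun q => rfl) hitems a
      rcases hc : dA.contains a with _ | _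
      · -- fresh alias: both insert
        have hcB : dB.contains a = false := by rw [hcont, hc]
        have hsA : pvStepA dA x = dA.insert a x := by simp [pvStepA, hA, hc]
        have hsB : pvStepB dB ((k : Int), x) = dB.insert a (k : Int) := by simp [pvStepB, hA, hcB]
        rw [hsA, hsB]
        -- first index of x in full is k
        have hxnotpre : x ∉ full.take k := by
          intro hxmem
          obtain ⟨j, hjlt, hje⟩ := List.getElem_of_mem hxmem
          have hjk : j < k := lt_of_lt_of_le hjlt (by simp [List.length_take])
          have hjfull : j < full.length := lt_trans hjk hklt
          have : full[j] = x := by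
            rw [List.getElem_take] at hje
            exact hje
          have := hfresh j hjk hjfull a (by rw [this, hA])
          rw [this] at hc; cases hc
        have hidx : PySem.List.index? full x = some k := by
          rw [PySem.List.index?_eq_some_iff]
          refine ⟨full.take k, full.drop (k+1), ?_, by simp [List.length_take]; omega, hxnotpre⟩
          conv_lhs => rw [← List.take_append_drop k full]
          rw [hdrop, hdrop1]
        refine IH (k+1) (dA.insert a x) (dB.insert a (k : Int)) hdrop1 ?_ ?_ ?_ (PySem.Dict.nodup_keys_insert _ _ _ hnd)
        · rw [PySem.Dict.items_insert_of_not_contains _ _ hc,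
              PySem.Dict.items_insert_of_not_contains _ _ hcB, hitems]
          simp only [List.map_append, List.map_cons, List.map_nil, hidx, Option.getD_some]
        · intro q hq
          rw [PySem.Dict.items_insert_of_not_contains _ _ hc] at hq
          rcases List.mem_append.mp hq with h' | h'
          · exact hmem q h'
          · simp at h'; subst h'; exact hxk ▸ List.getElem_mem hklt
        · intro j hj hjlt a' ha'
          rcases Nat.lt_succ_iff_lt_or_eq.mp hj with hlt | heq
          · rw [PySem.Dict.contains_insert]
            rw [hfresh j hlt hjlt a' ha']; simp
          · subst heq; rw [hxk, hA] at ha'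
            cases ha'; exact PySem.Dict.contains_insert_self _ _ _
      · -- alias already present: both skip
        have hcB : dB.contains a = true := by rw [hcont, hc]
        have hsA : pvStepA dA x = dA := by simp [pvStepA, hA, hc]
        have hsB : pvStepB dB ((k : Int), x) = dB := by simp [pvStepB, hA, hcB]
        rw [hsA, hsB]
        refine IH (k+1) dA dB hdrop1 hitems hmem ?_ hnd
        intro j hj hjlt a' ha'
        rcases Nat.lt_succ_iff_lt_or_eq.mp hj with hlt | heq
        · exact hfresh j hlt hjlt a' ha'
        · subst heq; rw [hxk, hA] at ha'; cases ha'; exact hc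

theorem build_isaac_joint_index_map_spec : Claim_equal_build_isaac_joint_index_map := by
  intro dof_names _
  unfold Spec_build_isaac_joint_index_map
  unfold build_isaac_joint_index_map build_isaac_joint_index_map_alt
  obtain ⟨h1, h2, h3⟩ := pvLoopRel dof_names dof_names 0 PySem.Dict.empty PySem.Dict.empty
    (by simp) (by rfl) (by intro q hq; cases hq) (by intro j hj; omega) (by exact List.nodup_nil)
  show ((_ : PySem.Dict String Int)).items = _
  rw [show (fun (d : PySem.Dict String Int) (p : Int × String) =>
        match pvAlias? p.2 with
        | none => d
        | some al => if d.contains al then d else d.insert al p.1) = pvStepB from rfl]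
  rw [show (fun (d : PySem.Dict String String) (name : String) =>
        match pvAlias? name with
        | none => d
        | some al => if d.contains al then d else d.insert al name) = pvStepA from rfl]
  rw [PySem.List.foldl_congr_mem _ _ (fun d q => d.insert q.1 (((PySem.List.index? dof_names q.2).getD 0 : Nat) : Int)) _
        (by intro acc q hq
            have hcq : dof_names.contains q.2 = true := by simpa using h2 q hq
            rw [if_pos hcq])]
  rw [PySem.Dict.items_foldl_insert_fresh _ Prod.fst _ _
        (by intro q _; rfl)
        (by exact h3)]
  simp only [Nat.cast_zero] at h1
  rw [h1]
  rfl
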